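-- pv_equiv track=rewrite | github.com/pypi-data/pypi-mirror-58 | packages/foliantcontrib.anchors/foliantcontrib.anchors-1.0.4.tar.gz/foliantcontrib.anchors-1.0.4/foliant/preprocessors/anchors.py | convert_to_anchor
-- ===== SOURCE A (Python) =====
-- def convert_to_anchor(reference: str) -> str:
--     '''
--     Convert reference string into correct anchor
--
--     >>> convert_to_anchor('GET /endpoint/method{id}')
--     'get-endpoint-method-id'
--     '''
--
--     result = ''
--     accum = False
--     header = reference
--     for char in header:
--         if char == '_' or char.isalpha():
--             if accum:
--                 accum = False
--                 result += f'-{char.lower()}'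
--             else:
--                 result += char.lower()
--         else:
--             accum = True
--     return result.strip(' -')
-- ===== SOURCE B (Python) =====
-- def convert_to_anchor(reference: str) -> str:
--     '''
--     Convert reference string into correct anchor
--
--     >>> convert_to_anchor('GET /endpoint/method{id}')
--     'get-endpoint-method-id'
--     '''
--
--     def keep(c):
--         return c == '_' or c.isalpha()
--
--     tokens = []
--     i, n = 0, len(reference)
--     while i < n:
--         if keep(reference[i]):
--             j = i
--             while j < n and keep(reference[j]):
--                 j += 1
--             tokens.append(reference[i:j].lower())
--             i = j
--         else:
--             i += 1
--     return '-'.join(tokens)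
-- ===== Notes on version B (the rewrite author's own statement) =====
-- stated objective: alternative
-- what changed: A builds the result string char by char with an accumulator flag that inserts dashes and finally strips stray leading separators; B first tokenizes the string into maximal runs of word characters (underscore or alphabetic) using a two-level index scan, lowercases each run, and joins the tokens with hyphens, needing no final strip.
import Mathlib
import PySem

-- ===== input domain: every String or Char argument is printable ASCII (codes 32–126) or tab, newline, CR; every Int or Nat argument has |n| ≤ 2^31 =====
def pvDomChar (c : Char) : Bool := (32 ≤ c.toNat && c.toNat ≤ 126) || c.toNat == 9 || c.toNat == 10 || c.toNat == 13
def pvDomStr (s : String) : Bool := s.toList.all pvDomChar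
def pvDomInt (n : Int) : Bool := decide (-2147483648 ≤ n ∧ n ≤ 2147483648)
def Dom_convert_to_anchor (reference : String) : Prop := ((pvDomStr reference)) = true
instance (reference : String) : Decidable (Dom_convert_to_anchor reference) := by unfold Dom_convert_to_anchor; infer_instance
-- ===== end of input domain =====

-- B replaces A's char-by-char accumulator-flag string building (plus a final strip)
-- by splitting the string into keep-runs (tokenize) and '-'.joining the lowered runs;
-- objective: alternative decomposition, same cost.

-- ===== PORT A =====
-- one step of A's for-loop: state = (result so far, accum flag)
def aStep (st : List Char × Bool) (c : Char) : List Char × Bool :=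
  if c == '_' || PySem.Chars.isalpha c then
    if st.2 then (st.1 ++ ['-', PySem.Chars.lowerChar c], false)
    else (st.1 ++ [PySem.Chars.lowerChar c], st.2)
  else (st.1, true)

def convert_to_anchor (reference : String) : String :=
  String.ofList (PySem.Chars.stripChars (reference.toList.foldl aStep ([], false)).1 [' ', '-'])

-- ===== PORT B =====
def bKeep (c : Char) : Bool := c == '_' || PySem.Chars.isalpha c

-- Source B's outer while loop: on a keep-char, the inner while scan is the takeWhile run
-- (reference[i:j].lower()) and i jumps past it (dropWhile); otherwise i advances by one.
def bTokens : List Char → List (List Char)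
  | [] => []
  | c :: cs =>
    if bKeep c then
      PySem.Chars.lower (c :: cs.takeWhile bKeep) :: bTokens (cs.dropWhile bKeep)
    else
      bTokens cs
termination_by cs => cs.length
decreasing_by
  · simpa using Nat.lt_succ_of_le (List.length_dropWhile_le bKeep cs)
  · simp

def convert_to_anchor_alt (reference : String) : String :=
  String.ofList (PySem.Chars.join ['-'] (bTokens reference.toList))

-- ===== PRECONDITION & SPEC =====
def Spec_convert_to_anchor (reference : String) (out : String) : Prop := out = convert_to_anchor_alt reference
instance (reference : String) (out : String) : Decidable (Spec_convert_to_anchor reference out) := by unfold Spec_convert_to_anchor; infer_instance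

-- ===== CLAIM (what is proved, stated in full; the proofs are below) =====
def Claim_equal_convert_to_anchor : Prop := ∀ (reference : String), Dom_convert_to_anchor reference → Spec_convert_to_anchor reference (convert_to_anchor reference)

-- ===== LEMMAS AND PROOFS =====

-- the strip predicate of A's final result.strip(' -')
def pvStrip (c : Char) : Bool := ([' ', '-'] : List Char).contains c

-- the suffix A's loop appends from here on, given the current accum flag
def outAux : Bool → List Char → List Char
  | _, [] => []
  | b, c :: cs =>
    if bKeep c then
      (if b then ['-', PySem.Chars.lowerChar c] else [PySem.Chars.lowerChar c]) ++ outAux false cs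
    else outAux true cs

theorem foldl_aStep (cs : List Char) (res : List Char) (b : Bool) :
    (List.foldl aStep (res, b) cs).1 = res ++ outAux b cs := by
  induction cs generalizing res b with
  | nil => simp [outAux]
  | cons c cs ih =>
    by_cases h : bKeep c = true
    · have h' : (c == '_' || PySem.Chars.isalpha c) = true := h
      cases b <;> simp [aStep, outAux, h, h', ih]
    · have h' : ¬ (c == '_' || PySem.Chars.isalpha c) = true := h
      simp [aStep, outAux, h, h', ih]

-- B's value, and the two shapes A's suffix takes (accum = true / false)
def Jn (cs : List Char) : List Char := PySem.Chars.join ['-'] (bTokens cs)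
def Fn (cs : List Char) : List Char := PySem.Chars.join ['-'] ([] :: bTokens cs)
def Gn : List Char → List Char
  | [] => []
  | c :: cs => if bKeep c then Jn (c :: cs) else Fn cs

theorem join_cons_head (a : Char) (x : List Char) (ts : List (List Char)) :
    PySem.Chars.join ['-'] ((a :: x) :: ts) = a :: PySem.Chars.join ['-'] (x :: ts) := by
  cases ts with
  | nil => simp [PySem.Chars.join_singleton]
  | cons t ts => rw [PySem.Chars.join_cons_cons, PySem.Chars.join_cons_cons]; simp

theorem Fn_cons_keep (c : Char) (cs : List Char) (h : bKeep c = true) :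
    Fn (c :: cs) = '-' :: Jn (c :: cs) := by
  unfold Fn Jn
  rw [bTokens, if_pos h, PySem.Chars.join_cons_cons]
  simp

theorem Jn_cons_keep (c : Char) (cs : List Char) (h : bKeep c = true) :
    Jn (c :: cs) = PySem.Chars.lowerChar c :: Gn cs := by
  cases cs with
  | nil =>
    simp [Jn, Gn, bTokens, h, PySem.Chars.lower, PySem.Chars.join_singleton]
  | cons d cs' =>
    by_cases hd : bKeep d = true
    · have h1 : bTokens (c :: d :: cs') =
          (PySem.Chars.lowerChar c :: PySem.Chars.lowerChar d ::
            PySem.Chars.lower (cs'.takeWhile bKeep)) :: bTokens (cs'.dropWhile bKeep) := by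
        rw [bTokens, if_pos h]
        simp [hd, PySem.Chars.lower]
      have h2 : bTokens (d :: cs') =
          (PySem.Chars.lowerChar d :: PySem.Chars.lower (cs'.takeWhile bKeep)) ::
            bTokens (cs'.dropWhile bKeep) := by
        rw [bTokens, if_pos hd]
        simp [PySem.Chars.lower]
      simp only [Jn, Gn, hd, if_pos, h1, h2]
      rw [join_cons_head]
    · have h1 : bTokens (c :: d :: cs') = [PySem.Chars.lowerChar c] :: bTokens cs' := by
        rw [bTokens, if_pos h]
        simp [hd, PySem.Chars.lower, bTokens]
      simp only [Jn, Gn, Fn, hd, if_neg, Bool.false_eq_true, not_false_iff, h1]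
      exact join_cons_head _ [] _

theorem outAux_eq (cs : List Char) : outAux true cs = Fn cs ∧ outAux false cs = Gn cs := by
  induction cs with
  | nil => simp [outAux, Fn, Gn, bTokens, PySem.Chars.join_singleton]
  | cons c cs ih =>
    by_cases h : bKeep c = true
    · constructor
      · rw [Fn_cons_keep _ _ h, Jn_cons_keep _ _ h]
        simp [outAux, h, ih.2]
      · rw [show Gn (c :: cs) = Jn (c :: cs) by simp [Gn, h], Jn_cons_keep _ _ h]
        simp [outAux, h, ih.2]
    · have hbt : bTokens (c :: cs) = bTokens cs := by rw [bTokens, if_neg h]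
      constructor
      · simp [outAux, h, ih.1, Fn, hbt]
      · simp [outAux, h, ih.1, Gn]

theorem char_le_toNat (a b : Char) : a ≤ b ↔ a.toNat ≤ b.toNat := by
  rw [Char.le_def, UInt32.le_iff_toNat_le]; exact Iff.rfl

theorem keep_nostrip (c : Char) (h : bKeep c = true) : pvStrip (PySem.Chars.lowerChar c) = false := by
  simp only [bKeep, Bool.or_eq_true, beq_iff_eq, PySem.Chars.isalpha] at h
  rcases h with h | h | h
  · subst h; decide
  · simp only [PySem.Chars.isupper, Bool.and_eq_true, decide_eq_true_eq] at h
    have n1 : 65 ≤ c.toNat := by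
      have := (char_le_toNat 'A' c).mp h.1
      rwa [show ('A').toNat = 65 by decide] at this
    have n2 : c.toNat ≤ 90 := by
      have := (char_le_toNat c 'Z').mp h.2
      rwa [show ('Z').toNat = 90 by decide] at this
    have hval : (c.toNat + 32).isValidChar := by left; omega
    have hlt : (PySem.Chars.lowerChar c).toNat = c.toNat + 32 := by
      simp [PySem.Chars.lowerChar, PySem.Chars.isupper, h.1, h.2, Char.toNat_ofNat, hval]
    simp only [pvStrip, List.contains_cons, List.contains_nil, Bool.or_false,
      Bool.or_eq_false_iff, beq_eq_false_iff_ne, ne_eq]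
    constructor <;> intro he <;> rw [he] at hlt
    · rw [show (' ').toNat = 32 by decide] at hlt; omega
    · rw [show ('-').toNat = 45 by decide] at hlt; omega
  · simp only [PySem.Chars.islower, Bool.and_eq_true, decide_eq_true_eq] at h
    have n1 : 97 ≤ c.toNat := by
      have := (char_le_toNat 'a' c).mp h.1
      rwa [show ('a').toNat = 97 by decide] at this
    have hnu : ¬ ('A' ≤ c ∧ c ≤ 'Z') := by
      rintro ⟨-, hb⟩
      have := (char_le_toNat c 'Z').mp hb
      rw [show ('Z').toNat = 90 by decide] at this
      omega
    have hlc : PySem.Chars.lowerChar c = c := by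
      simp only [PySem.Chars.lowerChar, PySem.Chars.isupper, Bool.and_eq_true,
        decide_eq_true_eq, ite_eq_right_iff]
      intro hc; exact absurd hc hnu
    rw [hlc]
    simp only [pvStrip, List.contains_cons, List.contains_nil, Bool.or_false,
      Bool.or_eq_false_iff, beq_eq_false_iff_ne, ne_eq]
    constructor <;> intro he <;> subst he
    · rw [show (' ').toNat = 32 by decide] at n1; omega
    · rw [show ('-').toNat = 45 by decide] at n1; omega

theorem tokens_ok (cs : List Char) :
    ∀ t ∈ bTokens cs, t ≠ [] ∧ ∀ x ∈ t, pvStrip x = false := by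
  induction cs using bTokens.induct with
  | case1 => simp [bTokens]
  | case2 c cs h ih =>
    intro t ht
    rw [bTokens, if_pos h] at ht
    rcases List.mem_cons.mp ht with rfl | ht
    · refine ⟨by simp [PySem.Chars.lower], ?_⟩
      intro x hx
      simp only [PySem.Chars.lower, List.mem_map, List.mem_cons] at hx
      obtain ⟨y, hy, rfl⟩ := hx
      rcases hy with rfl | hy
      · exact keep_nostrip _ h
      · exact keep_nostrip _ (List.mem_takeWhile_imp hy)
    · exact ih t ht
  | case3 c cs h ih =>
    intro t ht
    rw [bTokens, if_neg h] at ht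
    exact ih t ht

theorem dropWhile_eq_self_of (l : List Char) (h : ∀ c ∈ l, pvStrip c = false) :
    l.dropWhile pvStrip = l := by
  induction l with
  | nil => rfl
  | cons c cs ih => simp [h c (by simp)]

theorem join_ne_nil (t : List Char) (ts : List (List Char)) (h : t ≠ []) :
    PySem.Chars.join ['-'] (t :: ts) ≠ [] := by
  cases ts with
  | nil => simpa [PySem.Chars.join_singleton] using h
  | cons u ts => rw [PySem.Chars.join_cons_cons]; simp

theorem drop_join (ts : List (List Char))
    (h : ∀ t ∈ ts, t ≠ [] ∧ ∀ x ∈ t, pvStrip x = false) :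
    List.dropWhile pvStrip (PySem.Chars.join ['-'] ts) = PySem.Chars.join ['-'] ts := by
  cases ts with
  | nil => simp [PySem.Chars.join_nil]
  | cons t ts =>
    have ht := h t (by simp)
    cases ts with
    | nil =>
      rw [PySem.Chars.join_singleton]
      exact dropWhile_eq_self_of t ht.2
    | cons u ts' =>
      rw [PySem.Chars.join_cons_cons, List.append_assoc, List.dropWhile_append,
        dropWhile_eq_self_of t ht.2]
      simp [List.isEmpty_iff, ht.1]

theorem drop_rev_join (ts : List (List Char))
    (h : ∀ t ∈ ts, t ≠ [] ∧ ∀ x ∈ t, pvStrip x = false) :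
    List.dropWhile pvStrip (PySem.Chars.join ['-'] ts).reverse
      = (PySem.Chars.join ['-'] ts).reverse := by
  induction ts with
  | nil => simp [PySem.Chars.join_nil]
  | cons t ts ih =>
    have ht := h t (by simp)
    cases ts with
    | nil =>
      rw [PySem.Chars.join_singleton]
      refine dropWhile_eq_self_of t.reverse ?_
      intro c hc; exact ht.2 c (List.mem_reverse.mp hc)
    | cons u ts' =>
      have hu := h u (by simp)
      have hrest : ∀ t' ∈ u :: ts', t' ≠ [] ∧ ∀ x ∈ t', pvStrip x = false := by
        intro t' ht'; exact h t' (by simp [ht'])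
      have hne : PySem.Chars.join ['-'] (u :: ts') ≠ [] := join_ne_nil u ts' hu.1
      rw [PySem.Chars.join_cons_cons]
      rw [show (t ++ ['-'] ++ PySem.Chars.join ['-'] (u :: ts')).reverse
            = (PySem.Chars.join ['-'] (u :: ts')).reverse ++ (['-'] ++ t.reverse) by simp]
      rw [List.dropWhile_append, ih hrest]
      simp [List.isEmpty_iff, hne]

theorem strip_join (ts : List (List Char))
    (h : ∀ t ∈ ts, t ≠ [] ∧ ∀ x ∈ t, pvStrip x = false) :
    PySem.Chars.stripChars (PySem.Chars.join ['-'] ts) [' ', '-']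
      = PySem.Chars.join ['-'] ts := by
  show (List.dropWhile pvStrip
      (List.dropWhile pvStrip (PySem.Chars.join ['-'] ts)).reverse).reverse = _
  rw [drop_join ts h, drop_rev_join ts h, List.reverse_reverse]

theorem strip_dash_join (ts : List (List Char))
    (h : ∀ t ∈ ts, t ≠ [] ∧ ∀ x ∈ t, pvStrip x = false) :
    PySem.Chars.stripChars ('-' :: PySem.Chars.join ['-'] ts) [' ', '-']
      = PySem.Chars.join ['-'] ts := by
  show (List.dropWhile pvStrip
      (List.dropWhile pvStrip ('-' :: PySem.Chars.join ['-'] ts)).reverse).reverse = _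
  rw [List.dropWhile_cons_of_pos (by decide), drop_join ts h, drop_rev_join ts h,
    List.reverse_reverse]

-- ===== VERDICT (by name: the statement is the Claim_ definition above) =====
theorem convert_to_anchor_spec : Claim_equal_convert_to_anchor := by
  intro s _
  show convert_to_anchor s = convert_to_anchor_alt s
  unfold convert_to_anchor convert_to_anchor_alt
  rw [foldl_aStep, List.nil_append, (outAux_eq s.toList).2]
  congr 1
  cases hcs : s.toList with
  | nil => simp [Gn, bTokens, PySem.Chars.stripChars, PySem.Chars.join_nil]
  | cons c cs' =>
    by_cases h : bKeep c = true
    · rw [show Gn (c :: cs') = Jn (c :: cs') by simp [Gn, h]]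
      exact strip_join (bTokens (c :: cs')) (tokens_ok (c :: cs'))
    · rw [show Gn (c :: cs') = Fn cs' by simp [Gn, h],
        show bTokens (c :: cs') = bTokens cs' by rw [bTokens, if_neg h]]
      unfold Fn
      cases hb : bTokens cs' with
      | nil => simp [PySem.Chars.join_singleton, PySem.Chars.stripChars, PySem.Chars.join_nil]
      | cons t ts =>
        rw [PySem.Chars.join_cons_cons, List.nil_append]
        have hok : ∀ t' ∈ t :: ts, t' ≠ [] ∧ ∀ x ∈ t', pvStrip x = false := by
          rw [← hb]; exact tokens_ok cs'
        exact strip_dash_join (t :: ts) hok
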